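-- pv_equiv track=rewrite | github.com/jhug146/SevenBit | upload/destinations/vinted.py | _xpath_str
-- ===== SOURCE A (Python) =====
-- def _xpath_str(text: str) -> str:
--     """Return an XPath string literal that safely handles single quotes (e.g. Levi's)."""
--     if "'" not in text:
--         return f"'{text}'"
--     parts = text.split("'")
--     tokens = []
--     for i, part in enumerate(parts):
--         if part:
--             tokens.append(f"'{part}'")
--         if i < len(parts) - 1:
--             tokens.append('"\'"')
--     return "concat(" + ", ".join(tokens) + ")"
-- ===== SOURCE B (Python) =====
-- def _xpath_str(text: str) -> str:
--     """Return an XPath string literal that safely handles single quotes (e.g. Levi's)."""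
--     if "'" not in text:
--         return f"'{text}'"
--     tokens = []
--     run = []
--     for c in text:
--         if c == "'":
--             if run:
--                 tokens.append("'" + "".join(run) + "'")
--                 run = []
--             tokens.append('"\'"')
--         else:
--             run.append(c)
--     if run:
--         tokens.append("'" + "".join(run) + "'")
--     return "concat(" + ", ".join(tokens) + ")"
-- ===== Notes on version B (the rewrite author's own statement) =====
-- stated objective: alternative
-- what changed: Replaces split-on-quote plus an enumerate loop with index tests against len(parts)-1 by a single character scan that maintains the current run of non-quote characters and flushes it at each quote and at the end.
import Mathlib
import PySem

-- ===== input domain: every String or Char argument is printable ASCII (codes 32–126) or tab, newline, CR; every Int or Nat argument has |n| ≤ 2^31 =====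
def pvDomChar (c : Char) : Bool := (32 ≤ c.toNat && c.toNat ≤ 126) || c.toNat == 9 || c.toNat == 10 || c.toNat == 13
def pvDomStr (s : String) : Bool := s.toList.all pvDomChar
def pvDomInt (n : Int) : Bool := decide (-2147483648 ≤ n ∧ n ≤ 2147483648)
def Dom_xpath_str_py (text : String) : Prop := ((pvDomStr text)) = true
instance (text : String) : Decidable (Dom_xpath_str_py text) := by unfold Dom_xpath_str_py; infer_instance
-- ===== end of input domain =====

-- B replaces split-on-quote + enumerate/index tests by a one-pass character scan with a run accumulator; same cost (objective: alternative).

-- ===== PORT A =====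
-- token f"'{part}'"
def pvQuoteTok (p : List Char) : List Char := '\'' :: p ++ ['\'']
-- token '"\'"'
def pvEscTok : List Char := ['"', '\'', '"']

def xpath_str_py (text : String) : String :=
  if PySem.Chars.isIn ['\''] text.toList = false then
    String.mk ('\'' :: text.toList ++ ['\''])
  else
    let parts := PySem.Chars.splitOn text.toList ['\'']
    let tokens := (PySem.List.enumerate parts).foldl
      (fun toks ip =>
        let toks := if ip.2 ≠ [] then toks ++ [pvQuoteTok ip.2] else toks
        if ip.1 < (parts.length : Int) - 1 then toks ++ [pvEscTok] else toks) []
    String.mk ("concat(".toList ++ PySem.Chars.join (", ".toList) tokens ++ [')'])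

-- ===== PORT B =====
def xpath_str_py_alt (text : String) : String :=
  if PySem.Chars.isIn ['\''] text.toList = false then
    String.mk ('\'' :: text.toList ++ ['\''])
  else
    let st := text.toList.foldl
      (fun (st : List (List Char) × List Char) c =>
        if c = '\'' then
          ((if st.2 ≠ [] then st.1 ++ [pvQuoteTok st.2] else st.1) ++ [pvEscTok], [])
        else (st.1, st.2 ++ [c])) ([], [])
    let tokens := if st.2 ≠ [] then st.1 ++ [pvQuoteTok st.2] else st.1
    String.mk ("concat(".toList ++ PySem.Chars.join (", ".toList) tokens ++ [')'])

-- ===== PRECONDITION & SPEC =====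
def Spec_xpath_str_py (text : String) (out : String) : Prop := out = xpath_str_py_alt text
instance (text : String) (out : String) : Decidable (Spec_xpath_str_py text out) := by unfold Spec_xpath_str_py; infer_instance

-- ===== CLAIM (what is proved, stated in full; the proofs are below) =====
def Claim_equal_xpath_str_py : Prop := ∀ (text : String), Dom_xpath_str_py text → Spec_xpath_str_py text (xpath_str_py text)

-- ===== LEMMAS AND PROOFS =====

def pvSplit : List Char → List (List Char)
  | [] => [[]]
  | c :: rest => if c = '\'' then [] :: pvSplit rest else (pvSplit rest).modifyHead (c :: ·)

lemma pvSplit_ne_nil (cs : List Char) : pvSplit cs ≠ [] := by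
  induction cs with
  | nil => simp [pvSplit]
  | cons c rest ih =>
    simp only [pvSplit]
    split
    · simp
    · cases h : pvSplit rest with
      | nil => exact absurd h ih
      | cons a t => simp [List.modifyHead]

lemma pvGo_eq (q : Char) : ∀ (fuel : Nat) (l cur : List Char) (acc : List (List Char)),
    l.length < fuel → q = '\'' →
    PySem.Chars.splitOn.go [q] fuel l cur acc
      = acc.reverse ++ (pvSplit l).modifyHead (cur.reverse ++ ·) := by
  intro fuel
  induction fuel with
  | zero => intro l cur acc h _; omega
  | succ f ih =>
    intro l cur acc h hq
    cases l with
    | nil =>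
      simp [PySem.Chars.splitOn.go, pvSplit, List.modifyHead]
    | cons c rest =>
      rw [PySem.Chars.splitOn.go]
      by_cases hc : c = q
      · subst hc
        have hp : [c].isPrefixOf (c :: rest) = true := by simp [List.isPrefixOf]
        rw [if_pos hp]
        simp only [List.length_cons, List.length_nil, Nat.zero_add, List.drop_succ_cons, List.drop_zero]
        rw [ih rest [] (cur.reverse :: acc) (by simpa using Nat.lt_of_succ_lt_succ h) hq]
        simp [pvSplit, hq, List.modifyHead]
        cases pvSplit rest <;> rfl
      · have hp : [q].isPrefixOf (c :: rest) = false := by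
          simp [List.isPrefixOf]; exact fun hh => absurd hh.symm hc
        rw [if_neg (by simp [hp])]
        rw [ih rest (c :: cur) acc (by simpa using Nat.lt_of_succ_lt_succ h) hq]
        have hcq : ¬ c = '\'' := by rw [← hq]; exact hc
        simp only [pvSplit, if_neg hcq]
        cases h2 : pvSplit rest with
        | nil => exact absurd h2 (pvSplit_ne_nil rest)
        | cons a t => simp [List.modifyHead]

lemma pvSplitOn_eq (cs : List Char) : PySem.Chars.splitOn cs ['\''] = pvSplit cs := by
  rw [PySem.Chars.splitOn, pvGo_eq '\'' (cs.length + 1) cs [] [] (by omega) rfl]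
  cases h : pvSplit cs with
  | nil => exact absurd h (pvSplit_ne_nil cs)
  | cons a t => simp [List.modifyHead]

def pvTokParts : List (List Char) → List (List Char)
  | [] => []
  | [p] => if p ≠ [] then [pvQuoteTok p] else []
  | p :: p' :: rest => (if p ≠ [] then [pvQuoteTok p] else []) ++ [pvEscTok] ++ pvTokParts (p' :: rest)

lemma pvTokParts_cons (p : List Char) (l : List (List Char)) (h : l ≠ []) :
    pvTokParts (p :: l) = (if p ≠ [] then [pvQuoteTok p] else []) ++ [pvEscTok] ++ pvTokParts l := by
  cases l with
  | nil => exact absurd rfl h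
  | cons a t => rfl

lemma pvFoldl_aux (n : Int) : ∀ (l : List (Int × List Char)) (toks : List (List Char)),
    l.foldl (fun toks ip =>
        let toks := if ip.2 ≠ [] then toks ++ [pvQuoteTok ip.2] else toks
        if ip.1 < n - 1 then toks ++ [pvEscTok] else toks) toks
      = toks ++ l.flatMap (fun ip =>
          (if ip.2 ≠ [] then [pvQuoteTok ip.2] else []) ++ (if ip.1 < n - 1 then [pvEscTok] else [])) := by
  intro l
  induction l with
  | nil => simp
  | cons x xs ih =>
    intro toks
    simp only [List.foldl_cons, List.flatMap_cons, ih]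
    split_ifs <;> simp

lemma pvEnum_flatMap (n : Int) : ∀ (parts : List (List Char)) (s : Int),
    s + parts.length = n →
    (PySem.List.enumerate parts s).flatMap (fun ip =>
        (if ip.2 ≠ [] then [pvQuoteTok ip.2] else []) ++ (if ip.1 < n - 1 then [pvEscTok] else []))
      = pvTokParts parts := by
  intro parts
  induction parts with
  | nil => intro s _; simp [PySem.List.enumerate_nil, pvTokParts]
  | cons p rest ih =>
    intro s hs
    rw [PySem.List.enumerate_cons, List.flatMap_cons]
    cases rest with
    | nil =>
      have : ¬ (s < n - 1) := by simp at hs; omega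
      simp [PySem.List.enumerate_nil, this, pvTokParts]
    | cons p' t =>
      have hlt : s < n - 1 := by simp at hs; omega
      rw [ih (s + 1) (by simp at hs ⊢; omega)]
      rw [pvTokParts_cons p (p' :: t) (by simp)]
      simp [hlt]

lemma pvA_tokens_eq (parts : List (List Char)) :
    (PySem.List.enumerate parts).foldl
      (fun toks ip =>
        let toks := if ip.2 ≠ [] then toks ++ [pvQuoteTok ip.2] else toks
        if ip.1 < (parts.length : Int) - 1 then toks ++ [pvEscTok] else toks) []
      = pvTokParts parts := by
  rw [pvFoldl_aux, pvEnum_flatMap (parts.length : Int) parts 0 (by simp)]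
  simp

lemma pvScan_aux : ∀ (cs : List Char) (toks : List (List Char)) (run : List Char),
    (let st := cs.foldl
      (fun (st : List (List Char) × List Char) c =>
        if c = '\'' then
          ((if st.2 ≠ [] then st.1 ++ [pvQuoteTok st.2] else st.1) ++ [pvEscTok], [])
        else (st.1, st.2 ++ [c])) (toks, run)
     if st.2 ≠ [] then st.1 ++ [pvQuoteTok st.2] else st.1)
    = toks ++ pvTokParts ((pvSplit cs).modifyHead (run ++ ·)) := by
  intro cs
  induction cs with
  | nil =>
    intro toks run
    simp only [List.foldl_nil, pvSplit, List.modifyHead, pvTokParts]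
    split_ifs <;> simp_all
  | cons c rest ih =>
    intro toks run
    simp only [List.foldl_cons]
    by_cases hc : c = '\''
    · rw [if_pos hc]
      rw [ih]
      have h1 : (pvSplit rest).modifyHead (fun x => [] ++ x) = pvSplit rest := by
        cases pvSplit rest <;> simp [List.modifyHead]
      rw [h1]
      simp only [pvSplit, if_pos hc]
      have h2 : ([] :: pvSplit rest).modifyHead (fun x => run ++ x) = run :: pvSplit rest := by
        simp [List.modifyHead]
      rw [h2, pvTokParts_cons run (pvSplit rest) (pvSplit_ne_nil rest)]
      split_ifs <;> simp
    · rw [if_neg hc]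
      rw [ih]
      simp only [pvSplit, if_neg hc]
      cases h : pvSplit rest with
      | nil => exact absurd h (pvSplit_ne_nil rest)
      | cons a t => simp [List.modifyHead]

lemma pvB_scan_eq (cs : List Char) :
    (let st := cs.foldl
      (fun (st : List (List Char) × List Char) c =>
        if c = '\'' then
          ((if st.2 ≠ [] then st.1 ++ [pvQuoteTok st.2] else st.1) ++ [pvEscTok], [])
        else (st.1, st.2 ++ [c])) ([], [])
     if st.2 ≠ [] then st.1 ++ [pvQuoteTok st.2] else st.1)
    = pvTokParts (pvSplit cs) := by
  rw [pvScan_aux cs [] []]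
  cases h : pvSplit cs with
  | nil => exact absurd h (pvSplit_ne_nil cs)
  | cons a t => simp [List.modifyHead]

-- ===== VERDICT (by name: the statement is the Claim_ definition above) =====
theorem xpath_str_py_spec : Claim_equal_xpath_str_py := by
  intro text _
  unfold Spec_xpath_str_py xpath_str_py xpath_str_py_alt
  split
  · rfl
  · simp only [pvSplitOn_eq, pvA_tokens_eq, pvB_scan_eq]
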